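-- pv_equiv track=rewrite | github.com/hyeonjun/AlgorithmTest | Algorithm_Study/Algorithm_Type/Hash_UnionFind_Friend_Network.py | solution
-- ===== SOURCE A (Python) =====
-- def solution(N, data):
--     parent = {}
--     num = {}
--     answer = []
--     def find(x):
--         if x != parent[x]:
--             parent[x] = find(parent[x])
--         return parent[x]
--
--     def union(x, y):
--         x = find(x)
--         y = find(y)
--         if x != y:
--             parent[y] = x
--             num[x] += num[y]
--
--     for i in data:
--         if i[0] not in parent:
--             parent[i[0]] = i[0]
--             num[i[0]] = 1
--         if i[1] not in parent:
--             parent[i[1]] = i[1]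
--             num[i[1]] = 1
--         union(i[0], i[1])
--         answer.append(num[find(i[0])])
--     return answer
-- ===== SOURCE B (Python) =====
-- def solution(N, data):
--     comp = {}       # node -> representative of its component
--     members = {}    # representative -> list of members of the component
--     answer = []
--     for a, b in data:
--         if a not in comp:
--             comp[a] = a
--             members[a] = [a]
--         if b not in comp:
--             comp[b] = b
--             members[b] = [b]
--         ra = comp[a]
--         rb = comp[b]
--         if ra != rb:
--             for m in members[rb]:
--                 comp[m] = ra
--             members[ra] = members[ra] + members[rb]
--             del members[rb]
--         answer.append(len(members[comp[a]]))
--     return answer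
-- ===== Notes on version B (the rewrite author's own statement) =====
-- stated objective: alternative
-- what changed: Replaces the parent-pointer forest with recursive find and path compression by a flat node-to-representative map plus explicit per-component member lists: representatives are plain dict lookups, and a union relabels the absorbed component's members and concatenates the member lists, so there is no recursion, no find and no path compression at all.
import Mathlib
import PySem

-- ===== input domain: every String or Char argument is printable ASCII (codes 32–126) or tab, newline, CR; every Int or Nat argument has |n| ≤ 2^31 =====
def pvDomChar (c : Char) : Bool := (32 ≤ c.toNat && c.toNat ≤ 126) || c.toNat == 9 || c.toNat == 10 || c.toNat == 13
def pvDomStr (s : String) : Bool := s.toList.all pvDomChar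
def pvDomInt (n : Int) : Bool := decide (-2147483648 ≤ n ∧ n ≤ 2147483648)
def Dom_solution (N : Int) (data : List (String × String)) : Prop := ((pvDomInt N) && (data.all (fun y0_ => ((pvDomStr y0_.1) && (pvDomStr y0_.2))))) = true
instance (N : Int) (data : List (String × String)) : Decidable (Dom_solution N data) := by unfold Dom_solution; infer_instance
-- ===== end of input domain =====

-- B replaces A's parent-pointer forest (recursive find with path compression) by a flat
-- node→representative map plus explicit per-component member lists; objective: alternative.

-- ===== PORT A =====
-- find(x) with path compression; the Nat fuel and the `none` branch are totality guards only
-- (Python's recursion terminates on every state this program reaches, and find is only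
-- called on keys present in parent), they do not change the computed value.
def findA : Nat → PySem.Dict String String → String → PySem.Dict String String × String
  | 0, p, x => (p, x)
  | fuel+1, p, x =>
    match p.get? x with
    | none => (p, x)
    | some px =>
      if x = px then (p, x)
      else
        let r := findA fuel p px
        (r.1.insert x r.2, r.2)

-- union(x, y); num.getD's default 0 is a guard for Python's KeyError (unreachable here)
def unionA (p : PySem.Dict String String) (num : PySem.Dict String Int) (x y : String) :
    PySem.Dict String String × PySem.Dict String Int :=
  let fx := findA p.size p x
  let fy := findA fx.1.size fx.1 y
  if fx.2 = fy.2 then (fy.1, num)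
  else (fy.1.insert fy.2 fx.2, num.modify fx.2 0 (· + num.getD fy.2 0))

def loopA : List (String × String) → PySem.Dict String String → PySem.Dict String Int →
    List Int → List Int
  | [], _, _, ans => ans
  | (a, b) :: rest, p, num, ans =>
    let p1 := if p.contains a then p else p.insert a a
    let num1 := if p.contains a then num else num.insert a 1
    let p2 := if p1.contains b then p1 else p1.insert b b
    let num2 := if p1.contains b then num1 else num1.insert b 1
    let u := unionA p2 num2 a b
    let f := findA u.1.size u.1 a
    loopA rest f.1 u.2 (ans ++ [u.2.getD f.2 0])

def solution (N : Int) (data : List (String × String)) : List Int :=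
  loopA data PySem.Dict.empty PySem.Dict.empty []

-- ===== PORT B =====
-- comp maps every seen node to its representative; members maps each representative to the
-- list of nodes of its component.  getD defaults are KeyError guards (unreachable).
def loopB : List (String × String) → PySem.Dict String String →
    PySem.Dict String (List String) → List Int → List Int
  | [], _, _, ans => ans
  | (a, b) :: rest, c, ms, ans =>
    let c1 := if c.contains a then c else c.insert a a
    let ms1 := if c.contains a then ms else ms.insert a [a]
    let c2 := if c1.contains b then c1 else c1.insert b b
    let ms2 := if c1.contains b then ms1 else ms1.insert b [b]
    let ra := c2.getD a a
    let rb := c2.getD b b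
    let c3 := if ra = rb then c2 else (ms2.getD rb []).foldl (fun d m => d.insert m ra) c2
    let ms3 := if ra = rb then ms2 else (ms2.insert ra (ms2.getD ra [] ++ ms2.getD rb [])).erase rb
    loopB rest c3 ms3 (ans ++ [((ms3.getD (c3.getD a a) []).length : Int)])

def solution_alt (N : Int) (data : List (String × String)) : List Int :=
  loopB data PySem.Dict.empty PySem.Dict.empty []

-- ===== PRECONDITION & SPEC =====
def Spec_solution (N : Int) (data : List (String × String)) (out : List Int) : Prop := out = solution_alt N data
instance (N : Int) (data : List (String × String)) (out : List Int) : Decidable (Spec_solution N data out) := by unfold Spec_solution; infer_instance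

-- ===== CLAIM (what is proved, stated in full; the proofs are below) =====
def Claim_equal_solution : Prop := ∀ (N : Int) (data : List (String × String)), Dom_solution N data → Spec_solution N data (solution N data)

-- ===== LEMMAS AND PROOFS =====

-- chains of parent pointers: PathP p x r n means following p from x reaches r (a fixpoint)
-- in exactly n steps, every step via a present key.
inductive PathP (p : PySem.Dict String String) : String → String → Nat → Prop where
  | zero (x : String) : p.get? x = some x → PathP p x x 0
  | succ (x y r : String) (n : Nat) :
      p.get? x = some y → x ≠ y → PathP p y r n → PathP p x r (n + 1)

-- The coupling invariant between A's state (p, num) and B's state (c, ms).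
structure UFInv (p : PySem.Dict String String) (num : PySem.Dict String Int)
    (c : PySem.Dict String String) (ms : PySem.Dict String (List String)) : Prop where
  dom : ∀ x : String, (p.get? x).isSome ↔ (c.get? x).isSome
  root : ∀ x r : String, c.get? x = some r → c.get? r = some r
  fix : ∀ x : String, p.get? x = some x ↔ c.get? x = some x
  edge : ∀ x y : String, p.get? x = some y → c.get? x = c.get? y
  msdom : ∀ r : String, (ms.get? r).isSome ↔ c.get? r = some r
  msmem : ∀ r l, ms.get? r = some l → l.Nodup ∧ ∀ m, m ∈ l ↔ c.get? m = some r
  numv : ∀ r l, ms.get? r = some l → num.getD r 0 = (l.length : Int)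
  path : ∀ x r, c.get? x = some r →
    ∃ n l, ms.get? r = some l ∧ n < l.length ∧ PathP p x r n

-- small helpers ---------------------------------------------------------------

theorem dict_size_eq_keys_length {ν : Type} (d : PySem.Dict String ν) :
    d.size = d.keys.length := by
  simp [PySem.Dict.size, PySem.Dict.keys]

theorem dict_isSome_iff_mem_keys {ν : Type} (d : PySem.Dict String ν) (z : String) :
    (d.get? z).isSome ↔ z ∈ d.keys := by
  constructor
  · intro h
    exact (PySem.Dict.contains_iff_mem_keys d z).mp
      (by rw [PySem.Dict.contains_eq_isSome_get?]; exact h)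
  · intro h
    have hc := (PySem.Dict.contains_iff_mem_keys d z).mpr h
    rw [PySem.Dict.contains_eq_isSome_get?] at hc
    exact hc

theorem dict_get?_erase {ν : Type} (d : PySem.Dict String ν) (k z : String) :
    (d.erase k).get? z = if z = k then none else d.get? z := by
  rcases d with ⟨items⟩
  induction items with
  | nil => simp [PySem.Dict.erase, PySem.Dict.get?]
  | cons hd tl ih =>
    by_cases h1 : hd.1 = k <;> by_cases h2 : hd.1 = z <;> by_cases h3 : z = k <;>
      simp_all [PySem.Dict.erase, PySem.Dict.get?]

theorem foldl_insert_get? (l : List String) (d : PySem.Dict String String) (v z : String) :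
    (l.foldl (fun d m => d.insert m v) d).get? z = if z ∈ l then some v else d.get? z := by
  induction l generalizing d with
  | nil => simp
  | cons m t ih =>
    rw [List.foldl_cons, ih]
    by_cases ht : z ∈ t
    · simp [ht]
    · by_cases hzm : z = m
      · subst hzm; simp [ht, PySem.Dict.get?_insert_self]
      · simp [ht, hzm, PySem.Dict.get?_insert_of_ne _ _ hzm]

theorem dict_getD_eq {ν : Type} (d : PySem.Dict String ν) (k : String) (v d0 : ν)
    (h : d.get? k = some v) : d.getD k d0 = v := by
  rw [PySem.Dict.getD_eq_get?_getD, h]; rfl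

-- PathP facts -----------------------------------------------------------------

theorem PathP_end_fix {p : PySem.Dict String String} {x r : String} {n : Nat}
    (h : PathP p x r n) : p.get? r = some r := by
  induction h with
  | zero x hx => exact hx
  | succ x y r n hxy hne hp ih => exact ih

theorem PathP_unique {p : PySem.Dict String String} {x r r' : String} {n n' : Nat}
    (h : PathP p x r n) (h' : PathP p x r' n') : r = r' := by
  induction h generalizing r' n' with
  | zero x hx =>
    cases h' with
    | zero _ _ => rfl
    | succ _ y _ _ hxy hne _ => rw [hx] at hxy; cases hxy; exact absurd rfl hne
  | succ x y r n hxy hne hp ih =>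
    cases h' with
    | zero _ hx => rw [hx] at hxy; cases hxy; exact absurd rfl hne
    | succ _ y' _ n' hxy' _ hp' =>
      rw [hxy] at hxy'; cases hxy'; exact ih hp'

theorem PathP_comp {p c : PySem.Dict String String} {x r : String} {n : Nat}
    (h : PathP p x r n) (hedge : ∀ x y : String, p.get? x = some y → c.get? x = c.get? y) :
    c.get? x = c.get? r := by
  induction h with
  | zero _ _ => rfl
  | succ x y r n hxy hne hp ih => exact (hedge x y hxy).trans ih

theorem PathP_insert_fresh {p : PySem.Dict String String} {x r a v : String} {n : Nat}
    (h : PathP p x r n) (ha : p.get? a = none) : PathP (p.insert a v) x r n := by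
  induction h with
  | zero x hx =>
    have hxa : x ≠ a := fun hh => by subst hh; rw [ha] at hx; cases hx
    exact PathP.zero x (by rw [PySem.Dict.get?_insert_of_ne _ _ hxa]; exact hx)
  | succ x y r n hxy hne hp ih =>
    have hxa : x ≠ a := fun hh => by subst hh; rw [ha] at hxy; cases hxy
    exact PathP.succ _ _ _ _ (by rw [PySem.Dict.get?_insert_of_ne _ _ hxa]; exact hxy) hne ih

theorem PathP_insert_root_ne (p : PySem.Dict String String) (w v : String)
    (hw : p.get? w = some w) :
    ∀ z s m, PathP p z s m → w ≠ s → PathP (p.insert w v) z s m := by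
  intro z s m h
  induction h with
  | zero x hx =>
    intro hws
    exact PathP.zero x (by rw [PySem.Dict.get?_insert_of_ne _ _ (Ne.symm hws)]; exact hx)
  | succ x y r n hxy hne hp ih =>
    intro hws
    have hxw : x ≠ w := by
      intro hh; rw [hh, hw] at hxy; injection hxy with h4; exact hne (hh.trans h4)
    exact PathP.succ _ _ _ _ (by rw [PySem.Dict.get?_insert_of_ne _ _ hxw]; exact hxy) hne (ih hws)

theorem PathP_redirect (p : PySem.Dict String String) (ra : String)
    (hra : p.get? ra = some ra) :
    ∀ z rb m, PathP p z rb m → ra ≠ rb → PathP (p.insert rb ra) z ra (m + 1) := by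
  intro z rb m h
  induction h with
  | zero x hx =>
    intro hne
    refine PathP.succ _ _ _ 0 (PySem.Dict.get?_insert_self p x ra) (Ne.symm hne) (PathP.zero ra ?_)
    rw [PySem.Dict.get?_insert_of_ne _ _ hne]; exact hra
  | succ x y r n hxy hne' hp ih =>
    intro hne
    have hxr : x ≠ r := by
      intro hh
      have hfx := PathP_end_fix hp
      rw [hh, hfx] at hxy; injection hxy with h4; exact hne' (hh.trans h4)
    exact PathP.succ _ _ _ _ (by rw [PySem.Dict.get?_insert_of_ne _ _ hxr]; exact hxy) hne' (ih hne)

-- find ------------------------------------------------------------------------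

theorem findA_spec (fuel : Nat) (p : PySem.Dict String String) :
    ∀ (x r : String) (n : Nat), PathP p x r n → n < fuel →
    (findA fuel p x).2 = r ∧
    (findA fuel p x).1.keys = p.keys ∧
    (∀ z, (findA fuel p x).1.get? z = some z ↔ p.get? z = some z) ∧
    (∀ z w, (findA fuel p x).1.get? z = some w →
      p.get? z = some w ∨ (w = r ∧ ∃ k, PathP p z r k)) := by
  induction fuel with
  | zero => intro x r n h hf; omega
  | succ f ih =>
    intro x r n h hf
    cases h with
    | zero =>
      rename_i hx
      have e : findA (f + 1) p x = (p, x) := by simp [findA, hx]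
      rw [e]
      exact ⟨rfl, rfl, fun z => Iff.rfl, fun z w hzw => Or.inl hzw⟩
    | succ =>
      rename_i y n0 hxy hne hp
      have hn0 : n0 < f := by omega
      obtain ⟨ih2, ihkeys, ihfix, ihb⟩ := ih y r n0 hp hn0
      have e : findA (f + 1) p x = ((findA f p y).1.insert x (findA f p y).2, (findA f p y).2) := by
        simp [findA, hxy, hne]
      rw [e, ih2]
      have hrx : r ≠ x := by
        intro hh; subst hh
        have hfix := PathP_end_fix hp
        rw [hfix] at hxy; cases hxy; exact hne rfl
      refine ⟨rfl, ?_, ?_, ?_⟩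
      · have hxmem : x ∈ (findA f p y).1.keys := by
          rw [ihkeys]
          by_contra hmem
          have hnone := (PySem.Dict.get?_eq_none_iff_not_mem_keys p x).mpr hmem
          rw [hxy] at hnone; cases hnone
        rw [PySem.Dict.keys_insert_of_contains _ r
          ((PySem.Dict.contains_iff_mem_keys _ _).mpr hxmem), ihkeys]
      · intro z
        by_cases hzx : z = x
        · subst hzx
          rw [PySem.Dict.get?_insert_self]
          constructor
          · intro hh; cases hh; exact absurd rfl hrx
          · intro hh; rw [hxy] at hh; cases hh; exact absurd rfl hne
        · rw [PySem.Dict.get?_insert_of_ne _ _ hzx]; exact ihfix z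
      · intro z w hzw
        by_cases hzx : z = x
        · subst hzx
          rw [PySem.Dict.get?_insert_self] at hzw; cases hzw
          exact Or.inr ⟨rfl, n0 + 1, PathP.succ _ _ _ _ hxy hne hp⟩
        · rw [PySem.Dict.get?_insert_of_ne _ _ hzx] at hzw
          exact ihb z w hzw

theorem PathP_compress (p p' : PySem.Dict String String) (r : String)
    (hkeys : p'.keys = p.keys)
    (hfix : ∀ z, p'.get? z = some z ↔ p.get? z = some z)
    (hb : ∀ z w, p'.get? z = some w → p.get? z = some w ∨ (w = r ∧ ∃ k, PathP p z r k)) :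
    ∀ z s m, PathP p z s m → ∃ m' ≤ m, PathP p' z s m' := by
  intro z s m hzs
  induction hzs with
  | zero z hz => exact ⟨0, Nat.le_refl 0, PathP.zero z ((hfix z).mpr hz)⟩
  | succ z y' s' m0 hzy hne' hp' ihz =>
    obtain ⟨m', hm', hpath'⟩ := ihz
    have hzmem : z ∈ p.keys := by
      apply (dict_isSome_iff_mem_keys p z).mp
      rw [hzy]; rfl
    have hsome : (p'.get? z).isSome := by
      rw [dict_isSome_iff_mem_keys, hkeys]; exact hzmem
    obtain ⟨w, hw⟩ := Option.isSome_iff_exists.mp hsome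
    rcases hb z w hw with hold | ⟨hwr, k, hpk⟩
    · rw [hzy] at hold; injection hold with h4; rw [← h4] at hw
      exact ⟨m' + 1, by omega, PathP.succ _ _ _ _ hw hne' hpath'⟩
    · have hsr : s' = r :=
        PathP_unique (PathP.succ _ _ _ _ hzy hne' hp') hpk
      have hzsne : z ≠ s' := by
        intro hh
        have hfp := PathP_end_fix hp'
        rw [hh, hfp] at hzy; injection hzy with h4; exact hne' (hh.trans h4)
      have hr' : p'.get? s' = some s' :=
        (hfix s').mpr (PathP_end_fix hp')
      refine ⟨1, by omega, PathP.succ _ _ _ _ ?_ hzsne (PathP.zero _ hr')⟩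
      rw [hw, hwr, hsr]

theorem UFInv_find {p : PySem.Dict String String} {num : PySem.Dict String Int}
    {c : PySem.Dict String String} {ms : PySem.Dict String (List String)}
    (I : UFInv p num c ms) {a r : String} (h : c.get? a = some r) :
    (findA p.size p a).2 = r ∧ UFInv (findA p.size p a).1 num c ms ∧
    (findA p.size p a).1.size = p.size := by
  obtain ⟨n, l, hmsl, hnl, hpath⟩ := I.path a r h
  have hsub : l ⊆ p.keys := by
    intro m hm
    have hcm := ((I.msmem r l hmsl).2 m).mp hm
    have hsm : (p.get? m).isSome := (I.dom m).mpr (by rw [hcm]; rfl)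
    exact (dict_isSome_iff_mem_keys p m).mp hsm
  have hllen : l.length ≤ p.keys.length :=
    ((I.msmem r l hmsl).1.subperm hsub).length_le
  have hfuel : n < p.size := by rw [dict_size_eq_keys_length]; omega
  obtain ⟨h2, hkeys, hfix, hb⟩ := findA_spec p.size p a r n hpath hfuel
  have hsz : (findA p.size p a).1.size = p.size := by
    have h3 : (findA p.size p a).1.size = (findA p.size p a).1.keys.length :=
      dict_size_eq_keys_length _
    rw [h3, hkeys, ← dict_size_eq_keys_length p]
  refine ⟨h2, ?_, hsz⟩
  refine ⟨?_, I.root, ?_, ?_, I.msdom, I.msmem, I.numv, ?_⟩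
  · intro z
    rw [dict_isSome_iff_mem_keys, hkeys, ← dict_isSome_iff_mem_keys]
    exact I.dom z
  · intro z; exact (hfix z).trans (I.fix z)
  · intro z w hzw
    rcases hb z w hzw with hold | ⟨hwr, k, hpk⟩
    · exact I.edge z w hold
    · subst hwr; exact PathP_comp hpk I.edge
  · intro x' r' hx'
    obtain ⟨n', l', hl', hn', hp'⟩ := I.path x' r' hx'
    obtain ⟨m', hm', hpp⟩ := PathP_compress p (findA p.size p a).1 r hkeys hfix hb x' r' n' hp'
    exact ⟨m', l', hl', by omega, hpp⟩

-- invariant preservation ------------------------------------------------------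

theorem UFInv_empty :
    UFInv PySem.Dict.empty PySem.Dict.empty PySem.Dict.empty PySem.Dict.empty := by
  refine ⟨?_, ?_, ?_, ?_, ?_, ?_, ?_, ?_⟩ <;> intros <;> simp_all [PySem.Dict.get?_empty]

theorem UFInv_single {p : PySem.Dict String String} {num : PySem.Dict String Int}
    {c : PySem.Dict String String} {ms : PySem.Dict String (List String)}
    (I : UFInv p num c ms) {a : String} (ha : p.get? a = none) :
    UFInv (p.insert a a) (num.insert a 1) (c.insert a a) (ms.insert a [a]) := by
  have hc : c.get? a = none := by
    cases hcc : c.get? a with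
    | none => rfl
    | some v =>
      have hs := (I.dom a).mpr (by rw [hcc]; rfl)
      rw [ha] at hs; cases hs
  refine ⟨?_, ?_, ?_, ?_, ?_, ?_, ?_, ?_⟩
  · intro z
    by_cases hz : z = a
    · rw [hz]; simp [PySem.Dict.get?_insert_self]
    · rw [PySem.Dict.get?_insert_of_ne _ _ hz, PySem.Dict.get?_insert_of_ne _ _ hz]
      exact I.dom z
  · intro x r hx
    by_cases hxa : x = a
    · rw [hxa, PySem.Dict.get?_insert_self] at hx
      injection hx with h4
      rw [← h4]; exact PySem.Dict.get?_insert_self _ _ _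
    · rw [PySem.Dict.get?_insert_of_ne _ _ hxa] at hx
      have hr := I.root x r hx
      have hrne : r ≠ a := by
        intro hh; rw [hh, hc] at hr; simp at hr
      rw [PySem.Dict.get?_insert_of_ne _ _ hrne]; exact hr
  · intro z
    by_cases hz : z = a
    · rw [hz]; simp [PySem.Dict.get?_insert_self]
    · rw [PySem.Dict.get?_insert_of_ne _ _ hz, PySem.Dict.get?_insert_of_ne _ _ hz]
      exact I.fix z
  · intro x y hx
    by_cases hxa : x = a
    · rw [hxa, PySem.Dict.get?_insert_self] at hx
      injection hx with h4
      rw [hxa, ← h4]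
    · rw [PySem.Dict.get?_insert_of_ne _ _ hxa] at hx
      have hcx : (c.get? x).isSome := (I.dom x).mp (by rw [hx]; rfl)
      have hcy : (c.get? y).isSome := by rw [← I.edge x y hx]; exact hcx
      have hya : y ≠ a := by
        intro hh; rw [hh, hc] at hcy; cases hcy
      rw [PySem.Dict.get?_insert_of_ne _ _ hxa, PySem.Dict.get?_insert_of_ne _ _ hya]
      exact I.edge x y hx
  · intro r
    by_cases hr : r = a
    · rw [hr]; simp [PySem.Dict.get?_insert_self]
    · rw [PySem.Dict.get?_insert_of_ne _ _ hr, PySem.Dict.get?_insert_of_ne _ _ hr]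
      exact I.msdom r
  · intro r l hr
    by_cases hra : r = a
    · rw [hra] at hr ⊢
      rw [PySem.Dict.get?_insert_self] at hr
      injection hr with h4
      subst h4
      refine ⟨List.nodup_singleton a, fun m => ?_⟩
      by_cases hma : m = a
      · rw [hma]; simp [PySem.Dict.get?_insert_self]
      · rw [PySem.Dict.get?_insert_of_ne _ _ hma]
        simp only [List.mem_singleton, hma, false_iff]
        intro hm
        have hrt := I.root m a hm
        rw [hc] at hrt; simp at hrt
    · rw [PySem.Dict.get?_insert_of_ne _ _ hra] at hr
      obtain ⟨hnd, hmem⟩ := I.msmem r l hr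
      refine ⟨hnd, fun m => ?_⟩
      by_cases hma : m = a
      · rw [hma, PySem.Dict.get?_insert_self]
        constructor
        · intro hal
          have hca := (hmem a).mp hal
          rw [hc] at hca; simp at hca
        · intro hh; injection hh with h5; exact absurd h5 (Ne.symm hra)
      · rw [PySem.Dict.get?_insert_of_ne _ _ hma]; exact hmem m
  · intro r l hr
    by_cases hra : r = a
    · rw [hra] at hr ⊢
      rw [PySem.Dict.get?_insert_self] at hr
      injection hr with h4
      subst h4
      rw [PySem.Dict.getD_insert]; simp
    · rw [PySem.Dict.get?_insert_of_ne _ _ hra] at hr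
      rw [PySem.Dict.getD_insert, if_neg hra]
      exact I.numv r l hr
  · intro x r hx
    by_cases hxa : x = a
    · rw [hxa] at hx ⊢
      rw [PySem.Dict.get?_insert_self] at hx
      injection hx with h4
      rw [← h4]
      exact ⟨0, [a], PySem.Dict.get?_insert_self _ _ _, by simp,
        PathP.zero a (PySem.Dict.get?_insert_self p a a)⟩
    · rw [PySem.Dict.get?_insert_of_ne _ _ hxa] at hx
      obtain ⟨n, l, hl, hn, hp⟩ := I.path x r hx
      have hrt := I.root x r hx
      have hrnea : r ≠ a := by
        intro hh; rw [hh, hc] at hrt; simp at hrt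
      exact ⟨n, l, by rw [PySem.Dict.get?_insert_of_ne _ _ hrnea]; exact hl, hn,
        PathP_insert_fresh hp ha⟩

theorem UFInv_contains_eq {p : PySem.Dict String String} {num : PySem.Dict String Int}
    {c : PySem.Dict String String} {ms : PySem.Dict String (List String)}
    (I : UFInv p num c ms) (z : String) : p.contains z = c.contains z := by
  rw [PySem.Dict.contains_eq_isSome_get?, PySem.Dict.contains_eq_isSome_get?]
  have hiff := I.dom z
  cases h1 : (p.get? z).isSome <;> cases h2 : (c.get? z).isSome <;> simp_all

theorem UFInv_merge {p : PySem.Dict String String} {num : PySem.Dict String Int}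
    {c : PySem.Dict String String} {ms : PySem.Dict String (List String)}
    (I : UFInv p num c ms) {ra rb : String} {la lb : List String}
    (hra : c.get? ra = some ra) (hrb : c.get? rb = some rb) (hne : ra ≠ rb)
    (hla : ms.get? ra = some la) (hlb : ms.get? rb = some lb) :
    UFInv (p.insert rb ra) (num.modify ra 0 (· + num.getD rb 0))
      (lb.foldl (fun d m => d.insert m ra) c)
      ((ms.insert ra (la ++ lb)).erase rb) := by
  obtain ⟨hndla, hmemla⟩ := I.msmem ra la hla
  obtain ⟨hndlb, hmemlb⟩ := I.msmem rb lb hlb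
  have hra_la : ra ∈ la := (hmemla ra).mpr hra
  have hrb_lb : rb ∈ lb := (hmemlb rb).mpr hrb
  have hcraneb : ¬(c.get? ra = some rb) := by
    rw [hra]; intro hh; injection hh with h6; exact hne h6
  have hpra : p.get? ra = some ra := (I.fix ra).mpr hra
  have hprb : p.get? rb = some rb := (I.fix rb).mpr hrb
  have hnra : num.getD ra 0 = (la.length : Int) := I.numv ra la hla
  have hnrb : num.getD rb 0 = (lb.length : Int) := I.numv rb lb hlb
  have c'get : ∀ z, (lb.foldl (fun d m => d.insert m ra) c).get? z =
      if c.get? z = some rb then some ra else c.get? z := by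
    intro z; rw [foldl_insert_get?]
    by_cases hz : z ∈ lb
    · rw [if_pos hz, if_pos ((hmemlb z).mp hz)]
    · rw [if_neg hz, if_neg (fun hh => hz ((hmemlb z).mpr hh))]
  have ms'get : ∀ z, ((ms.insert ra (la ++ lb)).erase rb).get? z =
      if z = rb then none else if z = ra then some (la ++ lb) else ms.get? z := by
    intro z; rw [dict_get?_erase]
    by_cases h1 : z = rb
    · rw [if_pos h1, if_pos h1]
    · rw [if_neg h1, if_neg h1]
      by_cases h2 : z = ra
      · rw [h2, PySem.Dict.get?_insert_self, if_pos rfl]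
      · rw [PySem.Dict.get?_insert_of_ne _ _ h2, if_neg h2]
  refine ⟨?_, ?_, ?_, ?_, ?_, ?_, ?_, ?_⟩
  · -- dom
    intro z
    by_cases hz : z = rb
    · rw [hz, PySem.Dict.get?_insert_self, c'get, if_pos hrb]
    · rw [PySem.Dict.get?_insert_of_ne _ _ hz, c'get]
      by_cases hcz : c.get? z = some rb
      · rw [if_pos hcz]
        have hps : (p.get? z).isSome := (I.dom z).mpr (by rw [hcz]; rfl)
        simp [hps]
      · rw [if_neg hcz]; exact I.dom z
  · -- root
    intro x r hx
    rw [c'get] at hx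
    rw [c'get]
    by_cases hcx : c.get? x = some rb
    · rw [if_pos hcx] at hx; injection hx with h4
      rw [← h4, if_neg hcraneb]; exact hra
    · rw [if_neg hcx] at hx
      have hroot := I.root x r hx
      have hrnerb : r ≠ rb := by
        intro hh; rw [hh] at hx; exact hcx hx
      have hcond : ¬(c.get? r = some rb) := by
        rw [hroot]; intro hh; injection hh with h6; exact hrnerb h6
      rw [if_neg hcond]; exact hroot
  · -- fix
    intro z
    by_cases hz : z = rb
    · rw [hz, PySem.Dict.get?_insert_self, c'get, if_pos hrb]
    · rw [PySem.Dict.get?_insert_of_ne _ _ hz, c'get]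
      by_cases hcz : c.get? z = some rb
      · rw [if_pos hcz]
        constructor
        · intro hh
          have h7 := (I.fix z).mp hh
          rw [h7] at hcz; injection hcz with h8; exact absurd h8 hz
        · intro hh; injection hh with h4
          rw [← h4, hra] at hcz; injection hcz with h8; exact absurd h8 hne
      · rw [if_neg hcz]; exact I.fix z
  · -- edge
    intro x y hxy
    by_cases hxrb : x = rb
    · rw [hxrb, PySem.Dict.get?_insert_self] at hxy; injection hxy with h4
      rw [hxrb, ← h4, c'get, c'get, if_pos hrb, if_neg hcraneb, hra]
    · rw [PySem.Dict.get?_insert_of_ne _ _ hxrb] at hxy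
      have hedge := I.edge x y hxy
      rw [c'get, c'get, hedge]
  · -- msdom
    intro r
    rw [ms'get, c'get]
    by_cases h1 : r = rb
    · rw [h1, if_pos rfl, if_pos hrb]; simp [hne]
    · rw [if_neg h1]
      by_cases h2 : r = ra
      · rw [h2, if_pos rfl, if_neg hcraneb, hra]; simp
      · rw [if_neg h2]
        by_cases h3 : c.get? r = some rb
        · rw [if_pos h3]
          constructor
          · intro hh
            have h9 := (I.msdom r).mp hh
            rw [h9] at h3; injection h3 with h10; exact absurd h10 h1
          · intro hh; injection hh with h10; exact absurd h10.symm h2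
        · rw [if_neg h3]; exact I.msdom r
  · -- msmem
    intro r l hr
    rw [ms'get] at hr
    by_cases h1 : r = rb
    · rw [if_pos h1] at hr; simp at hr
    · rw [if_neg h1] at hr
      by_cases h2 : r = ra
      · rw [if_pos h2] at hr; injection hr with h4
        subst h4
        constructor
        · rw [List.nodup_append]
          refine ⟨hndla, hndlb, fun z hz1 z2 hz2 => ?_⟩
          intro heq
          have e1 := (hmemla z).mp hz1
          have e2 := (hmemlb z2).mp hz2
          rw [heq, e2] at e1; injection e1 with h5; exact hne h5.symm
        · intro m
          rw [h2, c'get]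
          by_cases h3 : c.get? m = some rb
          · rw [if_pos h3]
            constructor
            · intro _; rfl
            · intro _; exact List.mem_append.mpr (Or.inr ((hmemlb m).mpr h3))
          · rw [if_neg h3, List.mem_append]
            constructor
            · rintro (hma | hmb)
              · exact (hmemla m).mp hma
              · exact absurd ((hmemlb m).mp hmb) h3
            · intro hh; exact Or.inl ((hmemla m).mpr hh)
      · rw [if_neg h2] at hr
        obtain ⟨hnd, hmem⟩ := I.msmem r l hr
        refine ⟨hnd, fun m => ?_⟩
        rw [c'get]
        by_cases h3 : c.get? m = some rb
        · rw [if_pos h3]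
          constructor
          · intro hml
            have h9 := (hmem m).mp hml
            rw [h9] at h3; injection h3 with h10; exact absurd h10 h1
          · intro hh; injection hh with h10; exact absurd h10.symm h2
        · rw [if_neg h3]; exact hmem m
  · -- numv
    intro r l hr
    rw [ms'get] at hr
    rw [PySem.Dict.getD_modify]
    by_cases h1 : r = rb
    · rw [if_pos h1] at hr; simp at hr
    · rw [if_neg h1] at hr
      by_cases h2 : r = ra
      · rw [if_pos h2] at hr; injection hr with h4
        subst h4
        rw [if_pos h2, hnra, hnrb, List.length_append]
        push_cast; ring
      · rw [if_neg h2] at hr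
        rw [if_neg h2]; exact I.numv r l hr
  · -- path
    intro x r hx
    rw [c'get] at hx
    by_cases h3 : c.get? x = some rb
    · rw [if_pos h3] at hx; injection hx with h4
      rw [← h4]
      obtain ⟨n, l0, hl0, hn0, hp0⟩ := I.path x rb h3
      rw [hlb] at hl0; injection hl0 with h5
      subst h5
      refine ⟨n + 1, la ++ lb, ?_, ?_, ?_⟩
      · rw [ms'get, if_neg hne, if_pos rfl]
      · have hlen := List.length_pos_of_mem hra_la
        rw [List.length_append]; omega
      · exact PathP_redirect p ra hpra x rb n hp0 hne
    · rw [if_neg h3] at hx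
      obtain ⟨n, l0, hl0, hn0, hp0⟩ := I.path x r hx
      have hrnerb : r ≠ rb := by
        intro hh; rw [hh] at hx; exact h3 hx
      by_cases h2 : r = ra
      · rw [h2] at hl0 hp0 ⊢
        rw [hla] at hl0; injection hl0 with h5
        subst h5
        refine ⟨n, la ++ lb, ?_, ?_, ?_⟩
        · rw [ms'get, if_neg hne, if_pos rfl]
        · rw [List.length_append]; omega
        · exact PathP_insert_root_ne p rb ra hprb x ra n hp0 (Ne.symm hne)
      · refine ⟨n, l0, ?_, hn0, ?_⟩
        · rw [ms'get, if_neg hrnerb, if_neg h2]; exact hl0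
        · exact PathP_insert_root_ne p rb ra hprb x r n hp0 (fun hh => hrnerb hh.symm)

-- the two loops agree ---------------------------------------------------------

theorem UFInv_addNode {p : PySem.Dict String String} {num : PySem.Dict String Int}
    {c : PySem.Dict String String} {ms : PySem.Dict String (List String)}
    (I : UFInv p num c ms) (a : String) :
    UFInv (if c.contains a = true then p else p.insert a a)
          (if c.contains a = true then num else num.insert a 1)
          (if c.contains a = true then c else c.insert a a)
          (if c.contains a = true then ms else ms.insert a [a]) ∧
    (if c.contains a = true then c else c.insert a a).contains a = true ∧
    (∀ z, c.contains z = true →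
      (if c.contains a = true then c else c.insert a a).contains z = true) := by
  by_cases h1 : c.contains a = true
  · rw [if_pos h1, if_pos h1, if_pos h1, if_pos h1]
    exact ⟨I, h1, fun z hz => hz⟩
  · rw [if_neg h1, if_neg h1, if_neg h1, if_neg h1]
    have hpnone : p.get? a = none := by
      rw [PySem.Dict.get?_eq_none_iff_contains, UFInv_contains_eq I a]
      exact Bool.not_eq_true _ ▸ (by simpa using h1)
    refine ⟨UFInv_single I hpnone, PySem.Dict.contains_insert_self c a a, fun z hz => ?_⟩
    rw [PySem.Dict.contains_insert]
    simp [hz]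

theorem loop_eq : ∀ (data : List (String × String)) (p : PySem.Dict String String)
    (num : PySem.Dict String Int) (c : PySem.Dict String String)
    (ms : PySem.Dict String (List String)) (ans : List Int),
    UFInv p num c ms → loopA data p num ans = loopB data c ms ans := by
  intro data
  induction data with
  | nil => intro p num c ms ans I; rfl
  | cons hd rest ih =>
    rcases hd with ⟨a, b⟩
    intro p num c ms ans I
    simp only [loopA, loopB, unionA]
    rw [UFInv_contains_eq I a]
    obtain ⟨I1, hc1a, hc1keep⟩ := UFInv_addNode I a
    rw [UFInv_contains_eq I1 b]
    obtain ⟨I2, hc2b, hc2keep⟩ := UFInv_addNode I1 b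
    have hc2a := hc2keep a hc1a
    have hsa := hc2a
    rw [PySem.Dict.contains_eq_isSome_get?] at hsa
    obtain ⟨ra, hgeta⟩ := Option.isSome_iff_exists.mp hsa
    have hsb := hc2b
    rw [PySem.Dict.contains_eq_isSome_get?] at hsb
    obtain ⟨rb, hgetb⟩ := Option.isSome_iff_exists.mp hsb
    have hroot_a := I2.root a ra hgeta
    have hroot_b := I2.root b rb hgetb
    obtain ⟨hfa2, Ifa, hfasz⟩ := UFInv_find I2 hgeta
    obtain ⟨hfb2, Ifb, hfbsz⟩ := UFInv_find Ifa hgetb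
    have hgdA := dict_getD_eq _ _ _ a hgeta
    have hgdB := dict_getD_eq _ _ _ b hgetb
    rw [hfa2, hfb2, hgdA, hgdB]
    by_cases hrr : ra = rb
    · simp only [if_pos hrr]
      obtain ⟨hff2, Iff2, _⟩ := UFInv_find Ifb hgeta
      rw [hff2, hgdA]
      obtain ⟨l, hl⟩ := Option.isSome_iff_exists.mp ((I2.msdom ra).mpr hroot_a)
      have hmsgd := dict_getD_eq _ _ _ [] hl
      have hnum := I2.numv ra l hl
      rw [hmsgd, hnum]
      exact ih _ _ _ _ _ Iff2
    · simp only [if_neg hrr]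
      obtain ⟨la, hla⟩ := Option.isSome_iff_exists.mp ((I2.msdom ra).mpr hroot_a)
      obtain ⟨lb, hlb⟩ := Option.isSome_iff_exists.mp ((I2.msdom rb).mpr hroot_b)
      have hgdra := dict_getD_eq _ _ _ ([] : List String) hla
      have hgdrb := dict_getD_eq _ _ _ ([] : List String) hlb
      rw [hgdra, hgdrb]
      have I3 := UFInv_merge Ifb hroot_a hroot_b hrr hla hlb
      have hc3a : (lb.foldl (fun d m => d.insert m ra)
          (if (if c.contains a = true then c else c.insert a a).contains b = true
            then (if c.contains a = true then c else c.insert a a)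
            else (if c.contains a = true then c else c.insert a a).insert b b)).get? a = some ra := by
        rw [foldl_insert_get?]
        have hanotlb : a ∉ lb := by
          intro hh
          have h9 := ((I2.msmem rb lb hlb).2 a).mp hh
          rw [hgeta] at h9; injection h9 with h10; exact hrr h10
        rw [if_neg hanotlb]; exact hgeta
      obtain ⟨hff2, Iff2, _⟩ := UFInv_find I3 hc3a
      rw [hff2]
      have hgd3 := dict_getD_eq _ _ _ a hc3a
      rw [hgd3]
      have hms3ra : (((if (if c.contains a = true then c else c.insert a a).contains b = true
            then (if c.contains a = true then ms else ms.insert a [a])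
            else (if c.contains a = true then ms else ms.insert a [a]).insert b [b]).insert ra
              (la ++ lb)).erase rb).get? ra = some (la ++ lb) := by
        rw [dict_get?_erase, if_neg hrr, PySem.Dict.get?_insert_self]
      have hmsgd3 := dict_getD_eq _ _ _ ([] : List String) hms3ra
      have hnum3 := I3.numv ra (la ++ lb) hms3ra
      rw [hmsgd3, hnum3]
      exact ih _ _ _ _ _ Iff2

-- ===== VERDICT (by name: the statement is the Claim_ definition above) =====
theorem solution_spec : Claim_equal_solution := by
  intro N data _
  unfold Spec_solution solution solution_alt
  exact loop_eq data _ _ _ _ [] UFInv_empty
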